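-- pv_equiv track=rewrite | github.com/stupendousC/Hangman | hangman.py | UniqueLetters
-- ===== SOURCE A (Python) =====
-- def UniqueLetters(string):  #my own
--     """ Take a string and returns # of unique letters"""
--     letters = "abcdefghijklmnopqrstuvwxyz"
--     letters = list(letters)
--     uniqueSet = []
--     x = list(string)
--     for i in range(0, len(x)):
--         if x[i] in letters:
--             letters.remove(x[i])
--             uniqueSet.append(x[i])
--     return len(uniqueSet)
-- ===== SOURCE B (Python) =====
-- def UniqueLetters(string):
--     """ Take a string and returns # of unique letters"""
--     return sum(1 for ch in "abcdefghijklmnopqrstuvwxyz" if ch in string)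
-- ===== Notes on version B (the rewrite author's own statement) =====
-- stated objective: idiomatic
-- what changed: B iterates over the 26 fixed alphabet letters and counts those occurring in the input, instead of A's loop over the input that removes matched letters from a remaining-alphabet list and appends to a dedup list.
import Mathlib
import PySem

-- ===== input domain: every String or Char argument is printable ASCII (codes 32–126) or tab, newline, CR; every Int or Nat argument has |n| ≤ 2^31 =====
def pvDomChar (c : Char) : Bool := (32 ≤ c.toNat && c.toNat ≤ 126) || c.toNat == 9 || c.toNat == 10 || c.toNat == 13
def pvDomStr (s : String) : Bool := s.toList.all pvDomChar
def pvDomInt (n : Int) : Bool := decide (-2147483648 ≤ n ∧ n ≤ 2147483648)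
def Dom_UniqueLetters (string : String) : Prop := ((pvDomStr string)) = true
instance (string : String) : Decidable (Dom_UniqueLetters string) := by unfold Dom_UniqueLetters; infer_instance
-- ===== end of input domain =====

-- B counts, for each of the 26 fixed alphabet letters, whether it occurs in the input,
-- instead of A's input-driven loop that removes matched letters from a remaining-alphabet
-- list and appends them to a dedup list (objective: idiomatic).

-- ===== PORT A =====
def pvAlphabet : List Char := "abcdefghijklmnopqrstuvwxyz".toList

-- A's loop: for each character of the input (in order), if it is still in `letters`,
-- remove it from `letters` and append it to `uniqueSet`.
def pvGoA : List Char → List Char → List Char → List Char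
  | [], _, uniqueSet => uniqueSet
  | c :: rest, letters, uniqueSet =>
    if letters.contains c then pvGoA rest (letters.erase c) (uniqueSet ++ [c])
    else pvGoA rest letters uniqueSet

def UniqueLetters (string : String) : Int :=
  ((pvGoA string.toList pvAlphabet []).length : Int)

-- ===== PORT B =====
-- sum(1 for ch in "abc…z" if ch in string)
def UniqueLetters_alt (string : String) : Int :=
  "abcdefghijklmnopqrstuvwxyz".toList.foldl (fun acc ch => if string.toList.contains ch then acc + 1 else acc) 0

-- ===== PRECONDITION & SPEC =====
def Spec_UniqueLetters (string : String) (out : Int) : Prop := out = UniqueLetters_alt string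
instance (string : String) (out : Int) : Decidable (Spec_UniqueLetters string out) := by unfold Spec_UniqueLetters; infer_instance

-- ===== CLAIM (what is proved, stated in full; the proofs are below) =====
def Claim_equal_UniqueLetters : Prop := ∀ (string : String), Dom_UniqueLetters string → Spec_UniqueLetters string (UniqueLetters string)

-- ===== LEMMAS AND PROOFS =====

-- Invariant of A's loop: it adds to `uniqueSet` exactly those letters of the
-- still-remaining alphabet `letters` (no duplicates) that occur in the rest of the input.
theorem pvGoA_length (x : List Char) : ∀ (letters uniqueSet : List Char), letters.Nodup →
    (pvGoA x letters uniqueSet).length =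
      uniqueSet.length + letters.countP (fun d => x.contains d) := by
  induction x with
  | nil => intro letters uniqueSet _; simp [pvGoA]
  | cons c rest ih =>
    intro letters uniqueSet hnd
    simp only [pvGoA]
    by_cases hc : letters.contains c
    · have hmem : c ∈ letters := by simpa using hc
      have hperm : letters.Perm (c :: letters.erase c) := List.perm_cons_erase hmem
      rw [if_pos hc, ih _ _ (List.Nodup.erase c hnd),
          hperm.countP_eq (fun d => (c :: rest).contains d)]
      have hne : c ∉ letters.erase c := by
        simpa using (List.Nodup.not_mem_erase (a := c) hnd)
      have hcong : (letters.erase c).countP (fun d => (c :: rest).contains d)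
          = (letters.erase c).countP (fun d => rest.contains d) := by
        apply List.countP_congr
        intro d hd
        have : d ≠ c := fun h => hne (h ▸ hd)
        simp [this]
      rw [List.countP_cons, hcong]
      simp [List.length_append]
      omega
    · have hne : c ∉ letters := by simpa using hc
      rw [if_neg hc, ih _ _ hnd]
      have hcong : letters.countP (fun d => rest.contains d)
          = letters.countP (fun d => (c :: rest).contains d) := by
        apply List.countP_congr
        intro d hd
        have : d ≠ c := fun h => hne (h ▸ hd)
        simp [this]
      rw [hcong]

-- ===== VERDICT (by name: the statement is the Claim_ definition above) =====
theorem UniqueLetters_spec : Claim_equal_UniqueLetters := by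
  intro s _
  unfold Spec_UniqueLetters UniqueLetters UniqueLetters_alt
  rw [PySem.List.foldl_if_add_one, pvGoA_length s.toList pvAlphabet [] (by decide)]
  have : (fun d => s.toList.contains d) = fun d => decide (d ∈ s.toList) := by
    funext d; simp
  simp [this, pvAlphabet]
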